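-- pv_equiv track=rewrite | github.com/CharlesLB/farm-optimizer | utils/date.py | get_plant_month
-- ===== SOURCE A (Python) =====
-- def get_plant_month(month, tempo_de_frutificacao):
--     positions = 11
--     result = month - tempo_de_frutificacao
--
--     if result < 0:
--         while result < 0:
--             result += positions + 1
--
--         return result
--
--     return result
-- ===== SOURCE B (Python) =====
-- def get_plant_month(month, tempo_de_frutificacao):
--     result = month - tempo_de_frutificacao
--     return result % 12 if result < 0 else result
-- ===== Notes on version B (the rewrite author's own statement) =====
-- stated objective: simpler
-- what changed: Replaces the add-12-until-nonnegative loop with a single closed-form modulo expression (result % 12 when negative), keeping the raw value on the non-negative branch.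
import Mathlib
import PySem

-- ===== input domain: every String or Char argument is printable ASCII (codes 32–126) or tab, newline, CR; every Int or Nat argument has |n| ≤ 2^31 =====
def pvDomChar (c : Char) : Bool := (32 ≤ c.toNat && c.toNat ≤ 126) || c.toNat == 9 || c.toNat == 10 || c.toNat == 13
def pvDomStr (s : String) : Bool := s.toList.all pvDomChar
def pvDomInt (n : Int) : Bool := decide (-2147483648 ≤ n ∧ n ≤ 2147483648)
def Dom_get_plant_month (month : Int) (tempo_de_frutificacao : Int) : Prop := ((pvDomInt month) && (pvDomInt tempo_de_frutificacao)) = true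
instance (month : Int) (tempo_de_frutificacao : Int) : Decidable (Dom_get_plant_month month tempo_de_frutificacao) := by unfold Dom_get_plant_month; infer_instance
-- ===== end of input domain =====

-- ===== PORT A =====
-- while result < 0: result += positions + 1   (positions = 11)
def pvAddLoop (result : Int) : Int :=
  if result < 0 then pvAddLoop (result + (11 + 1)) else result
termination_by (-result).toNat
decreasing_by omega

def get_plant_month (month : Int) (tempo_de_frutificacao : Int) : Int :=
  let result := month - tempo_de_frutificacao
  if result < 0 then pvAddLoop result else result

-- ===== PORT B =====
-- B: closed-form — result % 12 when negative, else result unchanged (simpler, no loop)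
def get_plant_month_alt (month : Int) (tempo_de_frutificacao : Int) : Int :=
  let result := month - tempo_de_frutificacao
  if result < 0 then PySem.Int.mod result 12 else result

-- ===== PRECONDITION & SPEC =====
def Spec_get_plant_month (month : Int) (tempo_de_frutificacao : Int) (out : Int) : Prop := out = get_plant_month_alt month tempo_de_frutificacao
instance (month : Int) (tempo_de_frutificacao : Int) (out : Int) : Decidable (Spec_get_plant_month month tempo_de_frutificacao out) := by unfold Spec_get_plant_month; infer_instance

-- ===== CLAIM (what is proved, stated in full; the proofs are below) =====
def Claim_equal_get_plant_month : Prop := ∀ (month : Int) (tempo_de_frutificacao : Int), Dom_get_plant_month month tempo_de_frutificacao → Spec_get_plant_month month tempo_de_frutificacao (get_plant_month month tempo_de_frutificacao)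

-- ===== LEMMAS AND PROOFS =====

-- ===== VERDICT (by name: the statement is the Claim_ definition above) =====
theorem pvAddLoop_eq_mod (r : Int) (h : r < 0) : pvAddLoop r = PySem.Int.mod r 12 := by
  rw [pvAddLoop]
  simp only [if_pos h]
  by_cases h2 : r + (11 + 1) < 0
  · rw [pvAddLoop_eq_mod (r + (11 + 1)) h2]
    simp [PySem.Int.mod]
  · rw [pvAddLoop]
    simp only [if_neg h2]
    simp only [PySem.Int.mod, Int.fmod_eq_emod]
    omega
termination_by (-r).toNat
decreasing_by omega

theorem get_plant_month_spec : Claim_equal_get_plant_month := by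
  intro month t _
  unfold Spec_get_plant_month get_plant_month get_plant_month_alt
  by_cases h : month - t < 0
  · simp only [if_pos h]
    exact pvAddLoop_eq_mod _ h
  · rw [if_neg h, if_neg h]
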